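-- pv_equiv track=rewrite | github.com/ikornaselur/advent-of-code | src/advent_of_code/year_2020/day_06/__init__.py | count_yesses
-- ===== SOURCE A (Python) =====
-- from typing import List, Set
--
-- def count_yesses(rows: List[str]) -> int:
--     yesses = 0
--     answers: Set[str] = set()
--     for row in rows:
--         if not len(row):
--             yesses += len(answers)
--             answers = set()
--         else:
--             answers.update(set(row))
--     else:
--         yesses += len(answers)
--
--     return yesses
-- ===== SOURCE B (Python) =====
-- def count_yesses(rows):
--     seen = set()
--     gid = 0
--     for row in rows:
--         if not len(row):
--             gid += 1
--         else:
--             for ch in row: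
--                 seen.add((gid, ch))
--     return len(seen)
-- ===== Notes on version B (the rewrite author's own statement) =====
-- stated objective: alternative
-- what changed: B keeps no per-group character set at all: it tags every character with its group index (number of blank rows seen so far), collects the (group-id, char) pairs into one global set in a flat pass, and returns that set's size, instead of A's union-set that is flushed into a counter and reset at each blank row.
import Mathlib
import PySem

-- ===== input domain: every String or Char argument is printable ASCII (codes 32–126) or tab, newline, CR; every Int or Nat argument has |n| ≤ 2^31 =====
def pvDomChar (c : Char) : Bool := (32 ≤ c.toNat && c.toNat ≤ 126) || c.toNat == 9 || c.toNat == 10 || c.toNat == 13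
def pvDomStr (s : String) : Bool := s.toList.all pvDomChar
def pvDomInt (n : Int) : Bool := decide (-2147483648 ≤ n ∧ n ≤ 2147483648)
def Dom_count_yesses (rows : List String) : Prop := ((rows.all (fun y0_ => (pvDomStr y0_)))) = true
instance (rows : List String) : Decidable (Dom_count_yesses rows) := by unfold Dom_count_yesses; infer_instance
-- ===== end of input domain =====

-- B tags each character with its group index (blank rows seen so far) and counts one
-- global set of (group-id, char) pairs, instead of A's flushed-and-reset per-group set.

-- ===== PORT A =====
-- A's loop body: if not len(row): flush answers into yesses and reset; else answers.update(set(row))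
def pvStepA (st : Int × PySem.Set Char) (row : String) : Int × PySem.Set Char :=
  if PySem.Str.len row = 0 then (st.1 + PySem.Set.len st.2, PySem.Set.empty)
  else (st.1, PySem.Set.update st.2 (PySem.Set.ofList row.toList))

-- for row in rows: pvStepA; the for/else clause always runs (no break): one final flush
def count_yesses (rows : List String) : Int :=
  let st := rows.foldl pvStepA (0, (PySem.Set.empty : PySem.Set Char))
  st.1 + PySem.Set.len st.2

-- ===== PORT B =====
-- B's loop body: blank row bumps gid; otherwise 'for ch in row: seen.add((gid, ch))'
def pvStepB (st : Int × PySem.Set (Int × Char)) (row : String) : Int × PySem.Set (Int × Char) :=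
  if PySem.Str.len row = 0 then (st.1 + 1, st.2)
  else (st.1, row.toList.foldl (fun s ch => PySem.Set.add s (st.1, ch)) st.2)

-- return len(seen)
def count_yesses_alt (rows : List String) : Int :=
  PySem.Set.len (rows.foldl pvStepB (0, (PySem.Set.empty : PySem.Set (Int × Char)))).2

-- ===== PRECONDITION & SPEC =====
def Spec_count_yesses (rows : List String) (out : Int) : Prop := out = count_yesses_alt rows
instance (rows : List String) (out : Int) : Decidable (Spec_count_yesses rows out) := by unfold Spec_count_yesses; infer_instance

-- ===== CLAIM (what is proved, stated in full; the proofs are below) =====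
def Claim_equal_count_yesses : Prop := ∀ (rows : List String), Dom_count_yesses rows → Spec_count_yesses rows (count_yesses rows)

-- ===== LEMMAS AND PROOFS =====

-- the relation between A's state (y, answers) and B's state (g, seen)
def pvInv (y : Int) (answers : PySem.Set Char) (g : Int) (seen : PySem.Set (Int × Char)) : Prop :=
  answers.Nodup ∧ seen.Nodup ∧
  (∀ c : Char, c ∈ answers ↔ (g, c) ∈ seen) ∧
  (∀ p ∈ seen, p.1 ≤ g) ∧
  PySem.Set.len seen = y + PySem.Set.len answers

-- updating with set(l) is the same as updating with l (duplicate adds are no-ops)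
theorem pv_update_ofList (s : PySem.Set Char) (l : List Char) :
    PySem.Set.update s (PySem.Set.ofList l) = PySem.Set.update s l := by
  induction l using List.reverseRecOn with
  | nil => rfl
  | append_singleton xs x ih =>
    rw [PySem.Set.ofList_append_singleton, PySem.Set.update_append,
        PySem.Set.update_cons, PySem.Set.update_nil]
    by_cases h : x ∈ PySem.Set.ofList xs
    · have hx : x ∈ PySem.Set.update s xs :=
        (PySem.Set.mem_update s xs x).mpr (Or.inr ((PySem.Set.mem_ofList xs x).mp h))
      rw [PySem.Set.add_of_mem h, ih, PySem.Set.add_of_mem hx]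
    · rw [PySem.Set.add_of_not_mem h, PySem.Set.update_append,
          PySem.Set.update_cons, PySem.Set.update_nil, ih]

-- set(map f l) = map f (set(l)) for injective f
theorem pv_ofList_map (f : Char → Int × Char) (hf : Function.Injective f) (l : List Char) :
    PySem.Set.ofList (l.map f) = (PySem.Set.ofList l).map f := by
  induction l using List.reverseRecOn with
  | nil => rfl
  | append_singleton xs x ih =>
    rw [List.map_append, List.map_singleton, PySem.Set.ofList_append_singleton,
        PySem.Set.ofList_append_singleton, ih]
    by_cases h : x ∈ PySem.Set.ofList xs
    · rw [PySem.Set.add_of_mem h, PySem.Set.add_of_mem (List.mem_map_of_mem h)]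
    · have h2 : f x ∉ (PySem.Set.ofList xs).map f := by
        intro hm
        obtain ⟨a, ha, hfa⟩ := List.mem_map.mp hm
        exact h (hf hfa ▸ ha)
      rw [PySem.Set.add_of_not_mem h, PySem.Set.add_of_not_mem h2,
          List.map_append, List.map_singleton]

-- one non-blank row preserves the invariant
theorem pv_inv_row (y : Int) (answers : PySem.Set Char) (g : Int) (seen : PySem.Set (Int × Char))
    (l : List Char) (h : pvInv y answers g seen) :
    pvInv y (PySem.Set.update answers (PySem.Set.ofList l)) g
      (l.foldl (fun s ch => PySem.Set.add s (g, ch)) seen) := by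
  obtain ⟨hna, hns, hmem, hbd, hlen⟩ := h
  rw [pv_update_ofList, ← PySem.Set.update_map_eq_foldl_add]
  have hinj : Function.Injective (fun ch : Char => ((g, ch) : Int × Char)) := by
    intro a b hab
    simpa using hab
  refine ⟨PySem.Set.nodup_update answers l hna, PySem.Set.nodup_update _ _ hns, ?_, ?_, ?_⟩
  · intro c
    rw [PySem.Set.mem_update, PySem.Set.mem_update]
    constructor
    · rintro (hc | hc)
      · exact Or.inl ((hmem c).mp hc)
      · exact Or.inr (List.mem_map.mpr ⟨c, hc, rfl⟩)
    · rintro (hc | hc)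
      · exact Or.inl ((hmem c).mpr hc)
      · obtain ⟨a, ha, hea⟩ := List.mem_map.mp hc
        injection hea with h1 h2
        subst h2
        exact Or.inr ha
  · intro p hp
    rcases (PySem.Set.mem_update _ _ p).mp hp with hc | hc
    · exact hbd p hc
    · obtain ⟨a, -, rfl⟩ := List.mem_map.mp hc
      exact le_refl g
  · rw [PySem.Set.update_eq_append_filter, PySem.Set.update_eq_append_filter,
        pv_ofList_map _ hinj, List.filter_map]
    have hfc : List.filter ((fun y => !PySem.Set.contains seen y) ∘ fun ch : Char => ((g, ch) : Int × Char))
        (PySem.Set.ofList l) = List.filter (fun y => !PySem.Set.contains answers y) (PySem.Set.ofList l) := by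
      refine List.filter_congr ?_
      intro c _
      simp only [Function.comp]
      have : PySem.Set.contains seen (g, c) = PySem.Set.contains answers c := by
        by_cases hc : c ∈ answers
        · rw [(PySem.Set.contains_iff seen (g, c)).mpr ((hmem c).mp hc),
              (PySem.Set.contains_iff answers c).mpr hc]
        · have e1 : PySem.Set.contains answers c = false := by
            rw [Bool.eq_false_iff]
            intro hh
            exact hc ((PySem.Set.contains_iff answers c).mp hh)
          have e2 : PySem.Set.contains seen (g, c) = false := by
            rw [Bool.eq_false_iff]
            intro hh
            exact hc ((hmem c).mpr ((PySem.Set.contains_iff seen (g, c)).mp hh))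
          rw [e1, e2]
      rw [this]
    rw [hfc]
    simp only [PySem.Set.len, List.length_append, List.length_map] at hlen ⊢
    push_cast at hlen ⊢
    omega

-- the whole loop: from related states, A's final flush equals B's final count
theorem pv_main (rows : List String) : ∀ (y g : Int) (answers : PySem.Set Char)
    (seen : PySem.Set (Int × Char)), pvInv y answers g seen →
    (rows.foldl pvStepA (y, answers)).1 + PySem.Set.len (rows.foldl pvStepA (y, answers)).2 =
    PySem.Set.len (rows.foldl pvStepB (g, seen)).2 := by
  induction rows with
  | nil =>
    intro y g answers seen h
    simp only [List.foldl_nil]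
    have := h.2.2.2.2
    omega
  | cons r rest ih =>
    intro y g answers seen h
    simp only [List.foldl_cons]
    by_cases hr : PySem.Str.len r = 0
    · simp only [pvStepA, pvStepB, if_pos hr]
      refine ih _ _ _ _ ?_
      obtain ⟨hna, hns, hmem, hbd, hlen⟩ := h
      refine ⟨List.nodup_nil, hns, ?_, ?_, ?_⟩
      · intro c
        simp only [PySem.Set.empty, List.not_mem_nil, false_iff]
        intro hc
        have hb : g + 1 ≤ g := hbd _ hc
        omega
      · intro p hp
        have hb := hbd p hp
        omega
      · simp only [PySem.Set.len, PySem.Set.empty, List.length_nil] at hlen ⊢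
        push_cast at hlen ⊢
        omega
    · simp only [pvStepA, pvStepB, if_neg hr]
      exact ih _ _ _ _ (pv_inv_row y answers g seen r.toList h)

-- ===== VERDICT (by name: the statement is the Claim_ definition above) =====
theorem count_yesses_spec : Claim_equal_count_yesses := by
  intro rows _
  show count_yesses rows = count_yesses_alt rows
  refine pv_main rows 0 0 PySem.Set.empty PySem.Set.empty ?_
  refine ⟨List.nodup_nil, List.nodup_nil, ?_, ?_, rfl⟩
  · intro c
    simp [PySem.Set.empty]
  · intro p hp
    simp [PySem.Set.empty] at hp
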